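-- pv_equiv track=rewrite | github.com/Zhu-Justin/ZGEN | rna.py | RNAparser
-- ===== SOURCE A (Python) =====
-- def isRNANucleotide(letter):
--     """Determines if letter is an RNA nucleotide"""
--     if letter == 'A' or letter == 'C' or letter == 'G' or letter == 'U':
--         return True
--     return False
--
-- def RNAparser(text):
--     """Parses text to create valid RNA sequence"""
--     upper_text = text.upper()
--     RNAsequence = ""
--     # Splits text into an array of no whitespace text
--     no_space_text_array = upper_text.split()
--     # Parse through all the text in the text within the array, adding nucleotide letters to RNA sequence
--     for no_space_sequence in no_space_text_array:
--         for letter in no_space_sequence: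
--             if isRNANucleotide(letter):
--                 RNAsequence += letter
--             # If there exists invalid RNA nucleotide, then the text file must not be a RNA sequence
--             if not isRNANucleotide(letter):
--                 return ""
--     # Otherwise return a RNA sequence with no blank spaces
--     return RNAsequence
-- ===== SOURCE B (Python) =====
-- def RNAparser(text):
--     """Parses text to create valid RNA sequence"""
--     s = text.upper()
--     # delete every whitespace character by whole-string replacement
--     for ch in ' \t\n\x0b\x0c\r':
--         s = s.replace(ch, '')
--     # delete every valid nucleotide; anything left over makes the text invalid
--     leftover = s
--     for ch in 'ACGU':
--         leftover = leftover.replace(ch, '')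
--     return '' if leftover else s
-- ===== Notes on version B (the rewrite author's own statement) =====
-- stated objective: alternative
-- what changed: Replaces A's per-character scan (split into words, test each letter, early return) by whole-string deletion: str.replace removes each whitespace character to build the cleaned string, then removes each nucleotide letter from a copy, and the text is valid exactly when nothing is left over.
import Mathlib
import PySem

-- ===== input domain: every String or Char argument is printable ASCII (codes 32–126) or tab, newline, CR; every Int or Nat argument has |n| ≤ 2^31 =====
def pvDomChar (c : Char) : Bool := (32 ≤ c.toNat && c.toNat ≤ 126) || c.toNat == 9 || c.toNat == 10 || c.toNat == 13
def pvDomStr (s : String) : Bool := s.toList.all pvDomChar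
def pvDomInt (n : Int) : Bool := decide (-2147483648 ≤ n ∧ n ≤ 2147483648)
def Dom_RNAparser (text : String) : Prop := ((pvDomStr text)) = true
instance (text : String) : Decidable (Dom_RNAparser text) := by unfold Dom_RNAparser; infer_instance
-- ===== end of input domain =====

-- B replaces A's per-character scan-and-validate loops by whole-string deletion with
-- str.replace: delete whitespace to build the cleaned string, delete nucleotides from a
-- copy, valid iff nothing is left over (alternative decomposition, no per-char loop).

-- ===== PORT A =====
def isRNANucleotide (letter : Char) : Bool :=
  if letter == 'A' || letter == 'C' || letter == 'G' || letter == 'U' then true else false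

-- inner 'for letter in no_space_sequence' loop; none = the early 'return ""'
def RNAparser_letters (acc : List Char) (cs : List Char) : Option (List Char) :=
  match cs with
  | [] => some acc
  | c :: rest =>
    let acc' := if isRNANucleotide c then acc ++ [c] else acc
    if !isRNANucleotide c then none else RNAparser_letters acc' rest

-- outer 'for no_space_sequence in no_space_text_array' loop
def RNAparser_words (acc : List Char) (ws : List (List Char)) : List Char :=
  match ws with
  | [] => acc
  | w :: rest =>
    match RNAparser_letters acc w with
    | none => []
    | some acc' => RNAparser_words acc' rest

def RNAparser (text : String) : String :=
  let upper_text := PySem.Str.upper text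
  String.ofList (RNAparser_words [] (PySem.Chars.split₀ upper_text.toList))

-- ===== PORT B =====
def RNAparser_alt (text : String) : String :=
  let s0 := PySem.Str.upper text
  -- for ch in ' \t\n\x0b\x0c\r': s = s.replace(ch, '')
  let s := (" \t\n\x0b\x0c\r".toList).foldl
    (fun acc ch => PySem.Str.replace acc (String.ofList [ch]) "") s0
  -- for ch in 'ACGU': leftover = leftover.replace(ch, '')
  let leftover := ("ACGU".toList).foldl
    (fun acc ch => PySem.Str.replace acc (String.ofList [ch]) "") s
  if leftover == "" then s else ""

-- ===== PRECONDITION & SPEC =====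
def Spec_RNAparser (text : String) (out : String) : Prop := out = RNAparser_alt text
instance (text : String) (out : String) : Decidable (Spec_RNAparser text out) := by unfold Spec_RNAparser; infer_instance

-- ===== CLAIM =====
def Claim_equal_RNAparser : Prop := ∀ (text : String), Dom_RNAparser text → Spec_RNAparser text (RNAparser text)

-- ===== LEMMAS AND PROOFS =====

theorem mem_ACGU_eq (c : Char) :
    (decide (c ∈ ['A', 'C', 'G', 'U'])) = isRNANucleotide c := by
  simp only [isRNANucleotide, List.mem_cons, List.not_mem_nil, or_false]
  cases hA : decide (c = 'A') <;> cases hC : decide (c = 'C') <;> cases hG : decide (c = 'G') <;> cases hU : decide (c = 'U') <;> simp_all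

theorem letters_eq (cs acc : List Char) :
    RNAparser_letters acc cs =
      if cs.all isRNANucleotide then some (acc ++ cs) else none := by
  induction cs generalizing acc with
  | nil => simp [RNAparser_letters]
  | cons c rest ih =>
    by_cases h : isRNANucleotide c = true
    · simp [RNAparser_letters, h, ih]
    · simp [RNAparser_letters, Bool.eq_false_iff.mpr h]

theorem join0_cons (w : List Char) (ws : List (List Char)) :
    PySem.Chars.join [] (w :: ws) = w ++ PySem.Chars.join [] ws := by
  cases ws with
  | nil => simp [PySem.Chars.join_singleton, PySem.Chars.join_nil]
  | cons v vs => simpa using PySem.Chars.join_cons_cons [] w v vs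

theorem words_eq (ws : List (List Char)) (acc : List Char) :
    RNAparser_words acc ws =
      if ws.all (fun w => w.all isRNANucleotide)
      then acc ++ PySem.Chars.join [] ws else [] := by
  induction ws generalizing acc with
  | nil => simp [RNAparser_words, PySem.Chars.join_nil]
  | cons w rest ih =>
    by_cases h : w.all isRNANucleotide = true
    · simp [RNAparser_words, letters_eq, h, ih, join0_cons]
    · simp [RNAparser_words, letters_eq, h]

-- single-character replace with "" is filtering that character out
theorem replace_go_single (c : Char) :
    ∀ (fuel : Nat) (l acc : List Char), l.length ≤ fuel →
      PySem.Chars.replace.go [c] [] fuel l acc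
        = acc.reverse ++ l.filter (fun x => !(x == c)) := by
  intro fuel
  induction fuel with
  | zero => intro l acc h; simp at h; simp [h, PySem.Chars.replace.go]
  | succ n ih =>
    intro l acc h
    cases l with
    | nil => simp [PySem.Chars.replace.go]
    | cons x t =>
      simp only [PySem.Chars.replace.go]
      by_cases hx : x = c
      · subst hx
        simp [ih t acc (by simpa using Nat.le_of_succ_le_succ h)]
      · have : List.isPrefixOf [c] (x :: t) = false := by
          simp [List.isPrefixOf]
          intro hcx; exact (hx hcx.symm).elim
        simp [this, ih t (x :: acc) (by simpa using Nat.le_of_succ_le_succ h), hx]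

theorem replace_single (l : List Char) (c : Char) :
    PySem.Chars.replace l [c] [] = l.filter (fun x => !(x == c)) := by
  simp [PySem.Chars.replace, replace_go_single c l.length l [] le_rfl]

-- folding single-character deletions filters out membership in the list
theorem foldl_del (ws : List Char) :
    ∀ (l : List Char),
      ws.foldl (fun acc ch => acc.filter (fun x => !(x == ch))) l
        = l.filter (fun x => !(decide (x ∈ ws))) := by
  induction ws with
  | nil => intro l; simp
  | cons w rest ih =>
    intro l
    simp only [List.foldl_cons, ih, List.filter_filter]
    apply List.filter_congr
    intro x _
    by_cases hx : x = w <;> by_cases hm : x ∈ rest <;> simp [hx, hm]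

-- flatten of split₀ is the whitespace-free subsequence
theorem split₀_go_flatten :
    ∀ (l cur : List Char) (acc : List (List Char)),
      (PySem.Chars.split₀.go l cur acc).flatten
        = acc.reverse.flatten ++ cur.reverse ++ l.filter (fun c => !PySem.Chars.isspace c) := by
  intro l
  induction l with
  | nil =>
    intro cur acc
    by_cases h : cur = [] <;> simp [PySem.Chars.split₀.go, h]
  | cons c rest ih =>
    intro cur acc
    by_cases hs : PySem.Chars.isspace c = true
    · by_cases hc : cur = []
      · simp [PySem.Chars.split₀.go, hs, hc, ih]
      · simp [PySem.Chars.split₀.go, hs, List.isEmpty_iff, hc, ih]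
    · simp [PySem.Chars.split₀.go, hs, ih]

theorem join0_eq_flatten (ws : List (List Char)) :
    PySem.Chars.join [] ws = ws.flatten := by
  induction ws with
  | nil => simp [PySem.Chars.join_nil]
  | cons w rest ih => simp [join0_cons, ih]

theorem all_join0 (ws : List (List Char)) :
    (PySem.Chars.join [] ws).all isRNANucleotide
      = ws.all (fun w => w.all isRNANucleotide) := by
  induction ws with
  | nil => simp [PySem.Chars.join_nil]
  | cons w rest ih => simp [join0_cons, ih]

-- within the ASCII domain, Python's whitespace test is membership in ' \t\n\x0b\x0c\r'
theorem char_toNat_inj (a b : Char) (h : a.toNat = b.toNat) : a = b := by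
  apply Char.ext
  exact UInt32.toNat_inj.mp h

theorem mem_ws (c : Char) : (c ∈ " \t\n\x0b\x0c\r".toList) ↔ (c.toNat = 32 ∨ c.toNat = 9 ∨ c.toNat = 10 ∨ c.toNat = 11 ∨ c.toNat = 12 ∨ c.toNat = 13) := by
  have hl : " \t\n\x0b\x0c\r".toList = [' ', '\t', '\n', '\x0b', '\x0c', '\r'] := by decide
  rw [hl]
  simp only [List.mem_cons, List.not_mem_nil, or_false]
  constructor
  · rintro (rfl | rfl | rfl | rfl | rfl | rfl) <;> simp [Char.toNat]
  · rintro (h|h|h|h|h|h) <;>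
      [exact Or.inl (char_toNat_inj c ' ' h);
       exact Or.inr (Or.inl (char_toNat_inj c '\t' h));
       exact Or.inr (Or.inr (Or.inl (char_toNat_inj c '\n' h)));
       exact Or.inr (Or.inr (Or.inr (Or.inl (char_toNat_inj c '\x0b' h))));
       exact Or.inr (Or.inr (Or.inr (Or.inr (Or.inl (char_toNat_inj c '\x0c' h)))));
       exact Or.inr (Or.inr (Or.inr (Or.inr (Or.inr (char_toNat_inj c '\r' h)))))]

theorem isspace_iff (c : Char) :
    PySem.Chars.isspace c = true ↔
      (c.toNat = 32 ∨ (9 ≤ c.toNat ∧ c.toNat ≤ 13) ∨ (28 ≤ c.toNat ∧ c.toNat ≤ 31) ∨ c.toNat = 133 ∨ c.toNat = 160 ∨ c.toNat = 5760 ∨ (8192 ≤ c.toNat ∧ c.toNat ≤ 8202) ∨ c.toNat = 8232 ∨ c.toNat = 8233 ∨ c.toNat = 8239 ∨ c.toNat = 8287 ∨ c.toNat = 12288) := by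
  simp [PySem.Chars.isspace]
  tauto

theorem isspace_dom (c : Char) (h : pvDomChar c = true) :
    PySem.Chars.isspace c = decide (c ∈ " \t\n\x0b\x0c\r".toList) := by
  simp only [pvDomChar, Bool.or_eq_true, Bool.and_eq_true, decide_eq_true_eq, beq_iff_eq] at h
  by_cases hs : PySem.Chars.isspace c = true
  · rw [hs]
    symm
    rw [decide_eq_true_iff, mem_ws]
    have := (isspace_iff c).mp hs
    omega
  · rw [Bool.eq_false_iff.mpr hs]
    symm
    rw [decide_eq_false_iff_not, mem_ws]
    rw [isspace_iff] at hs
    omega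

theorem islower_iff (c : Char) : PySem.Chars.islower c = true ↔ (97 ≤ c.toNat ∧ c.toNat ≤ 122) := by
  simp only [PySem.Chars.islower, Bool.and_eq_true, decide_eq_true_eq]
  exact ⟨fun ⟨a,b⟩ => ⟨a,b⟩, fun ⟨a,b⟩ => ⟨a,b⟩⟩

-- upper preserves the domain character-wise
theorem upperChar_dom (c : Char) (h : pvDomChar c = true) : pvDomChar (PySem.Chars.upperChar c) = true := by
  simp only [pvDomChar, Bool.or_eq_true, Bool.and_eq_true, decide_eq_true_eq, beq_iff_eq] at h ⊢
  simp only [PySem.Chars.upperChar]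
  split_ifs with hl
  · rw [islower_iff] at hl
    have hv : (c.toNat - 32).isValidChar := Or.inl (by omega)
    have : (Char.ofNat (c.toNat - 32)).toNat = c.toNat - 32 := by
      simp [Char.toNat_ofNat, hv]
    left; omega
  · exact h

theorem upper_dom (text : String) (h : pvDomStr text = true) :
    ∀ c ∈ (PySem.Str.upper text).toList, pvDomChar c = true := by
  intro c hc
  rw [PySem.Str.toList_upper] at hc
  simp only [PySem.Chars.upper, List.mem_map] at hc
  obtain ⟨d, hd, rfl⟩ := hc
  have hdom : pvDomChar d = true := by
    simp only [pvDomStr, List.all_eq_true] at h; exact h d hd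
  exact upperChar_dom d hdom

theorem foldl_replace_toList (ws : List Char) :
    ∀ (start : String),
      (ws.foldl (fun acc ch => PySem.Str.replace acc (String.ofList [ch]) "") start).toList
        = ws.foldl (fun acc ch => acc.filter (fun x => !(x == ch))) start.toList := by
  induction ws with
  | nil => intro start; rfl
  | cons w rest ih =>
    intro start
    rw [List.foldl_cons, List.foldl_cons, ih]
    congr 1
    rw [PySem.Str.toList_replace]
    have h1 : (String.ofList [w]).toList = [w] := String.toList_ofList
    have h2 : "".toList = ([] : List Char) := rfl
    rw [h1, h2]
    exact replace_single start.toList w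

theorem string_eq_of_toList (s t : String) (h : s.toList = t.toList) : s = t := by
  have := congrArg String.ofList h
  simpa using this

-- ===== VERDICT =====
theorem RNAparser_spec : Claim_equal_RNAparser := by
  intro text hdom
  unfold Spec_RNAparser RNAparser RNAparser_alt
  simp only []
  set up := (PySem.Str.upper text).toList with hup
  have hACGU : "ACGU".toList = ['A', 'C', 'G', 'U'] := by decide
  -- the cleaned (whitespace-free) text
  set cleaned := up.filter (fun c => !PySem.Chars.isspace c) with hcl
  have hflat : (PySem.Chars.split₀ up).flatten = cleaned := by
    simpa [PySem.Chars.split₀] using split₀_go_flatten up [] []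
  have hjoin : PySem.Chars.join [] (PySem.Chars.split₀ up) = cleaned := by
    rw [join0_eq_flatten, hflat]
  -- B's whitespace-deletion phase produces exactly the cleaned text
  have hs : ((" \t\n\x0b\x0c\r".toList).foldl
      (fun acc ch => PySem.Str.replace acc (String.ofList [ch]) "") (PySem.Str.upper text)).toList
        = cleaned := by
    rw [foldl_replace_toList, foldl_del, hcl]
    apply List.filter_congr
    intro x hx
    rw [isspace_dom x (upper_dom text hdom x hx)]
  -- B's leftover phase is empty iff every cleaned character is a nucleotide
  have hleft : ((("ACGU".toList).foldl
      (fun acc ch => PySem.Str.replace acc (String.ofList [ch]) "")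
      ((" \t\n\x0b\x0c\r".toList).foldl
        (fun acc ch => PySem.Str.replace acc (String.ofList [ch]) "") (PySem.Str.upper text))).toList)
        = cleaned.filter (fun x => !isRNANucleotide x) := by
    rw [foldl_replace_toList, foldl_del, hs]
    apply List.filter_congr
    intro x _
    rw [hACGU, mem_ACGU_eq]
  have hcond : (cleaned.filter (fun x => !isRNANucleotide x) = [])
      ↔ cleaned.all isRNANucleotide = true := by
    rw [List.filter_eq_nil_iff, List.all_eq_true]
    constructor
    · intro h a ha
      have := h a ha
      simpa using this
    · intro h a ha
      simp [h a ha]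
  rw [words_eq]
  by_cases hv : cleaned.all isRNANucleotide = true
  · have hws : (PySem.Chars.split₀ up).all (fun w => w.all isRNANucleotide) = true := by
      rw [← all_join0, hjoin]; exact hv
    rw [if_pos hws, List.nil_append, hjoin]
    have hempty : ((("ACGU".toList).foldl
        (fun acc ch => PySem.Str.replace acc (String.ofList [ch]) "")
        ((" \t\n\x0b\x0c\r".toList).foldl
          (fun acc ch => PySem.Str.replace acc (String.ofList [ch]) "") (PySem.Str.upper text)))) = "" := by
      apply string_eq_of_toList
      rw [hleft]
      simpa using hcond.mpr hv
    rw [if_pos (by rw [hempty]; rfl)]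
    apply string_eq_of_toList
    rw [hs]
    simp
  · have hws : (PySem.Chars.split₀ up).all (fun w => w.all isRNANucleotide) = false := by
      rw [← all_join0, hjoin]; exact Bool.eq_false_iff.mpr hv
    rw [hws]
    simp only [Bool.false_eq_true, if_false]
    have hne : ((("ACGU".toList).foldl
        (fun acc ch => PySem.Str.replace acc (String.ofList [ch]) "")
        ((" \t\n\x0b\x0c\r".toList).foldl
          (fun acc ch => PySem.Str.replace acc (String.ofList [ch]) "") (PySem.Str.upper text))) == "") = false := by
      rw [beq_eq_false_iff_ne]
      intro hcontra
      apply hv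
      apply hcond.mp
      rw [← hleft, hcontra]
      rfl
    rw [if_neg (ne_true_of_eq_false hne)]
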